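-- pv_equiv track=rewrite | github.com/rhoitjadhav/competitive-programming-practice | binarysearch/Remove Last Duplicate Entries.py | solve
-- ===== SOURCE A (Python) =====
-- def solve(nums):
--     duplicates = {}
--
--     for num in nums:
--         if duplicates.get(num):
--             duplicates[num] += 1
--         else:
--             duplicates[num] = 1
--
--     result = []
--     for num in reversed(nums):
--         if duplicates[num] > 1:
--             duplicates[num] = 1
--         else:
--             result.append(num)
--
--     result.reverse()
--
--     return result
-- ===== SOURCE B (Python) =====
-- def solve(nums):
--     first = {}
--     last = {}
--     for i, x in enumerate(nums):
--         if x not in first: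
--             first[x] = i
--         last[x] = i
--     return [x for i, x in enumerate(nums) if i != last[x] or first[x] == last[x]]
-- ===== Notes on version B (the rewrite author's own statement) =====
-- stated objective: alternative
-- what changed: B replaces A's count-dict plus reversed second pass with mutable count resets by one forward pass recording each element's first and last occurrence index, then keeps nums[i] exactly when i is not the last occurrence or the element is unique (first == last); no reversal and no count bookkeeping.
import Mathlib
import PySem

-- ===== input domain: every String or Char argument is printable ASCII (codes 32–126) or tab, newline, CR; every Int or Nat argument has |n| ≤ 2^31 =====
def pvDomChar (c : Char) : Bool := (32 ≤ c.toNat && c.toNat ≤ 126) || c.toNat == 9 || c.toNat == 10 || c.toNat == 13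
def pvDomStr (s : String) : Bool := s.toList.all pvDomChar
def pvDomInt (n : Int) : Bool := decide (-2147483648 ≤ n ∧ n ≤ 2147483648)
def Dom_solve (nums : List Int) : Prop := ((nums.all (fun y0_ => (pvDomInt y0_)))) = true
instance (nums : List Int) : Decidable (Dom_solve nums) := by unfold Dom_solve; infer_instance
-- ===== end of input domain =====

-- B replaces A's count-dict + reversed mutate-and-rescan pass by one forward pass over first/last
-- occurrence indices (alternative structure, same O(n) cost).


-- ===== PORT A =====
-- 'duplicates.get(num)' truthiness = getD 0 ≠ 0; 'duplicates[num]' is ported as getD 0 (exact here: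
-- the second loop looks up only elements of nums, whose keys the first loop always inserted).
def solve (nums : List Int) : List Int :=
  let duplicates : PySem.Dict Int Int :=
    nums.foldl (fun d num =>
      if d.getD num 0 ≠ 0 then d.insert num (d.getD num 0 + 1)
      else d.insert num 1) PySem.Dict.empty
  let st : PySem.Dict Int Int × List Int :=
    nums.reverse.foldl (fun s num =>
      if s.1.getD num 0 > 1 then (s.1.insert num 1, s.2)
      else (s.1, s.2 ++ [num])) (duplicates, [])
  st.2.reverse

-- ===== PORT B =====
-- one forward pass building first/last occurrence index dicts, then the filtering comprehension
def solve_alt (nums : List Int) : List Int :=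
  let fl : PySem.Dict Int Int × PySem.Dict Int Int :=
    (PySem.List.enumerate nums).foldl
      (fun s p =>
        ((if s.1.contains p.2 then s.1 else s.1.insert p.2 p.1), s.2.insert p.2 p.1))
      (PySem.Dict.empty, PySem.Dict.empty)
  (PySem.List.enumerate nums).foldl
    (fun out p =>
      if p.1 ≠ fl.2.getD p.2 0 ∨ fl.1.getD p.2 0 = fl.2.getD p.2 0 then out ++ [p.2] else out)
    []

-- ===== PRECONDITION & SPEC =====
def Spec_solve (nums : List Int) (out : List Int) : Prop := out = solve_alt nums
instance (nums : List Int) (out : List Int) : Decidable (Spec_solve nums out) := by unfold Spec_solve; infer_instance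

-- ===== CLAIM (what is proved, stated in full; the proofs are below) =====
def Claim_equal_solve : Prop := ∀ (nums : List Int), Dom_solve nums → Spec_solve nums (solve nums)

-- ===== LEMMAS AND PROOFS =====

-- the common characterisation: keep x (at some position, tail t) iff x reoccurs in t or occurs exactly once
def pvF (c : Int → Int) : List Int → List Int
  | [] => []
  | x :: t => (if x ∈ t ∨ c x ≤ 1 then [x] else []) ++ pvF c t

-- A's second loop, with the dict state abstracted into the list 'seen' of already-processed elements
def pvG (c : Int → Int) : List Int → List Int → List Int
  | _, [] => []
  | seen, y :: t => (if y ∈ seen ∨ c y ≤ 1 then [y] else []) ++ pvG c (y :: seen) t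

theorem pvG_append (c : Int → Int) (a b seen : List Int) :
    pvG c seen (a ++ b) = pvG c seen a ++ pvG c (a.reverse ++ seen) b := by
  induction a generalizing seen with
  | nil => simp [pvG]
  | cons y a' ih =>
    simp only [List.cons_append, pvG, ih, List.reverse_cons, List.append_assoc,
      List.nil_append]

theorem pvG_rev (c : Int → Int) (ns : List Int) :
    pvG c [] ns.reverse = (pvF c ns).reverse := by
  induction ns with
  | nil => simp [pvG, pvF]
  | cons x t ih =>
    rw [List.reverse_cons, pvG_append, ih]
    simp only [List.reverse_reverse, List.append_nil, pvF, List.reverse_append]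
    by_cases h : x ∈ t ∨ c x ≤ 1 <;> simp [pvG, h]

-- A's first loop is the standard counting loop
theorem pvCount_getD (nums : List Int) (x : Int) :
    (nums.foldl (fun d num =>
      if d.getD num 0 ≠ 0 then d.insert num (d.getD num 0 + 1)
      else d.insert num 1) PySem.Dict.empty).getD x 0 = (nums.count x : Int) := by
  have hstep : (fun (d : PySem.Dict Int Int) num =>
      if d.getD num 0 ≠ 0 then d.insert num (d.getD num 0 + 1) else d.insert num 1)
      = fun d num => d.insert num (d.getD num 0 + 1) := by
    funext d num
    split
    · rfl
    · next h =>
      have h0 : d.getD num 0 = 0 := by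
        by_contra hne
        exact h hne
      rw [h0]
      norm_num
  rw [hstep, PySem.Dict.getD_foldl_insert_add_one]
  simp

-- A's second loop: the dict carries 'count, reset to 1 once seen', so it is pvG
theorem pvLoop2 (c : Int → Int) (l : List Int) :
    ∀ (d : PySem.Dict Int Int) (res seen : List Int),
      (∀ x ∈ l, d.getD x 0 = if x ∈ seen then 1 else c x) →
      (∀ x ∈ l, 1 ≤ c x) →
      (l.foldl (fun s num =>
        if s.1.getD num 0 > 1 then (s.1.insert num 1, s.2)
        else (s.1, s.2 ++ [num])) (d, res)).2 = res ++ pvG c seen l := by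
  induction l with
  | nil => intro d res seen _ _; simp [pvG]
  | cons y t ih =>
    intro d res seen hinv hc
    have hy := hinv y (List.mem_cons_self ..)
    have hcy1 : 1 ≤ c y := hc y (List.mem_cons_self ..)
    simp only [List.foldl_cons]
    by_cases hk : y ∈ seen ∨ c y ≤ 1
    · have hle : ¬ d.getD y 0 > 1 := by
        rcases hk with hs | hle
        · rw [hy, if_pos hs]; omega
        · rw [hy]; split <;> omega
      rw [if_neg hle, ih d (res ++ [y]) (y :: seen) ?_ (fun x hx => hc x (List.mem_cons_of_mem _ hx))]
      · simp [pvG, hk]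
      · intro x hx
        by_cases hxy : x = y
        · subst hxy
          rw [hy]
          simp only [List.mem_cons, true_or, if_pos]
          split
          · rfl
          · next hs =>
            have := hc x (List.mem_cons_self ..)
            rcases hk with h | h
            · exact absurd h hs
            · omega
        · rw [hinv x (List.mem_cons_of_mem _ hx)]
          simp [hxy]
    · rw [not_or] at hk
      obtain ⟨hs, hgt⟩ := hk
      have hgt' : d.getD y 0 > 1 := by rw [hy, if_neg hs]; omega
      rw [if_pos hgt', ih _ res (y :: seen) ?_ (fun x hx => hc x (List.mem_cons_of_mem _ hx))]
      · simp [pvG, hs]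
        omega
      · intro x hx
        by_cases hxy : x = y
        · subst hxy
          simp [PySem.Dict.getD_insert_self]
        · rw [PySem.Dict.getD_insert, if_neg hxy, hinv x (List.mem_cons_of_mem _ hx)]
          simp [hxy]

theorem solve_eq_pvF (nums : List Int) : solve nums = pvF (fun x => (nums.count x : Int)) nums := by
  dsimp only [solve]
  rw [pvLoop2 (fun x => (nums.count x : Int)) nums.reverse _ [] []
      (by intro x hx; simpa using pvCount_getD nums x)
      (by intro x hx
          rw [List.mem_reverse] at hx
          have := List.count_pos_iff.mpr hx
          show (1:Int) ≤ (List.count x nums : Int)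
          exact_mod_cast this)]
  rw [List.nil_append, pvG_rev, List.reverse_reverse]

-- last-occurrence dict fold: untouched when x is absent, bounded below when present
theorem pvLastKeep (x : Int) (t : List Int) : ∀ (s : Int) (d : PySem.Dict Int Int), x ∉ t →
    ((PySem.List.enumerate t s).foldl (fun d p => d.insert p.2 p.1) d).get? x = d.get? x := by
  induction t with
  | nil => intro s d _; simp [PySem.List.enumerate_nil]
  | cons y t' ih =>
    intro s d hx
    rw [PySem.List.enumerate_cons]
    simp only [List.foldl_cons]
    rw [ih (s+1) _ (fun h => hx (List.mem_cons_of_mem _ h))]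
    exact PySem.Dict.get?_insert_of_ne _ _ (fun h => hx (h ▸ List.mem_cons_self ..))

theorem pvLastLB (x : Int) (t : List Int) : ∀ (s : Int) (d : PySem.Dict Int Int), x ∈ t →
    ∃ j, ((PySem.List.enumerate t s).foldl (fun d p => d.insert p.2 p.1) d).get? x = some j ∧ s ≤ j := by
  induction t with
  | nil => intro s d hx; cases hx
  | cons y t' ih =>
    intro s d hx
    rw [PySem.List.enumerate_cons]
    simp only [List.foldl_cons]
    by_cases hxt : x ∈ t'
    · obtain ⟨j, hj, hsj⟩ := ih (s+1) _ hxt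
      exact ⟨j, hj, by omega⟩
    · have hxy : x = y := by
        rcases List.mem_cons.mp hx with h | h
        · exact h
        · exact absurd h hxt
      subst hxy
      rw [pvLastKeep x t' (s+1) _ hxt, PySem.Dict.get?_insert_self]
      exact ⟨s, rfl, le_refl s⟩

-- first-occurrence dict fold: untouched when x is absent, frozen once set, bounded when first set inside
theorem pvFirstKeep (x : Int) (t : List Int) : ∀ (s : Int) (d : PySem.Dict Int Int), x ∉ t →
    ((PySem.List.enumerate t s).foldl
      (fun d p => if d.contains p.2 then d else d.insert p.2 p.1) d).get? x = d.get? x := by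
  induction t with
  | nil => intro s d _; simp [PySem.List.enumerate_nil]
  | cons y t' ih =>
    intro s d hx
    rw [PySem.List.enumerate_cons]
    simp only [List.foldl_cons]
    rw [ih (s+1) _ (fun h => hx (List.mem_cons_of_mem _ h))]
    split
    · rfl
    · exact PySem.Dict.get?_insert_of_ne _ _ (fun h => hx (h ▸ List.mem_cons_self ..))

theorem pvFirstSome (x j : Int) (t : List Int) : ∀ (s : Int) (d : PySem.Dict Int Int),
    d.get? x = some j →
    ((PySem.List.enumerate t s).foldl
      (fun d p => if d.contains p.2 then d else d.insert p.2 p.1) d).get? x = some j := by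
  induction t with
  | nil => intro s d h; simpa [PySem.List.enumerate_nil] using h
  | cons y t' ih =>
    intro s d h
    rw [PySem.List.enumerate_cons]
    simp only [List.foldl_cons]
    apply ih (s+1)
    by_cases hxy : x = y
    · subst hxy
      have : d.contains x = true := by rw [PySem.Dict.contains_eq_isSome_get?, h]; rfl
      rw [if_pos this]
      exact h
    · split
      · exact h
      · rw [PySem.Dict.get?_insert_of_ne _ _ hxy]
        exact h

theorem pvFirstUB (x : Int) (t : List Int) : ∀ (s : Int) (d : PySem.Dict Int Int),
    x ∈ t → d.get? x = none →
    ∃ j, ((PySem.List.enumerate t s).foldl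
      (fun d p => if d.contains p.2 then d else d.insert p.2 p.1) d).get? x = some j ∧
      s ≤ j ∧ j < s + t.length := by
  induction t with
  | nil => intro s d hx _; cases hx
  | cons y t' ih =>
    intro s d hx hnone
    rw [PySem.List.enumerate_cons]
    simp only [List.foldl_cons]
    by_cases hxy : x = y
    · subst hxy
      have hc : d.contains x = false := by rw [PySem.Dict.contains_eq_isSome_get?, hnone]; rfl
      rw [if_neg (by simp [hc])]
      refine ⟨s, pvFirstSome x s t' (s+1) _ (PySem.Dict.get?_insert_self _ _ _), le_refl s, ?_⟩
      simp only [List.length_cons]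
      push_cast
      omega
    · have hxt : x ∈ t' := by
        rcases List.mem_cons.mp hx with h | h
        · exact absurd h hxy
        · exact h
      have hnone' : (if d.contains y then d else d.insert y s).get? x = none := by
        split
        · exact hnone
        · rw [PySem.Dict.get?_insert_of_ne _ _ hxy]; exact hnone
      obtain ⟨j, hj, h1, h2⟩ := ih (s+1) _ hxt hnone'
      refine ⟨j, hj, by omega, ?_⟩
      simp only [List.length_cons]
      push_cast
      omega

-- B's filter condition, evaluated at position |a| of a ++ x :: t, equals pvF's condition
theorem pvCond (a t : List Int) (x : Int) :
    (((a.length : Int) ≠ ((PySem.List.enumerate (a ++ x :: t) 0).foldl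
        (fun d p => d.insert p.2 p.1) PySem.Dict.empty).getD x 0
      ∨ ((PySem.List.enumerate (a ++ x :: t) 0).foldl
        (fun d p => if d.contains p.2 then d else d.insert p.2 p.1) PySem.Dict.empty).getD x 0
        = ((PySem.List.enumerate (a ++ x :: t) 0).foldl
        (fun d p => d.insert p.2 p.1) PySem.Dict.empty).getD x 0)
     ↔ (x ∈ t ∨ ((a ++ x :: t).count x : Int) ≤ 1)) := by
  simp only [PySem.List.enumerate_append, PySem.List.enumerate_cons, List.foldl_append,
    List.foldl_cons, zero_add]
  simp only [PySem.Dict.getD_eq_get?_getD]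
  have hcount : ((a ++ x :: t).count x : Int) = (a.count x : Int) + (t.count x : Int) + 1 := by
    rw [List.count_append, List.count_cons_self]
    push_cast
    ring
  by_cases hxt : x ∈ t
  · obtain ⟨j, hj, hsj⟩ := pvLastLB x t ((a.length : Int) + 1) _ hxt
    rw [hj]
    exact iff_of_true (Or.inl (by simp only [Option.getD_some]; omega)) (Or.inl hxt)
  · rw [pvLastKeep x t _ _ hxt, PySem.Dict.get?_insert_self, pvFirstKeep x t _ _ hxt]
    by_cases hxa : x ∈ a
    · obtain ⟨j, hj, h0, hlen⟩ :=
        pvFirstUB x a 0 PySem.Dict.empty hxa (PySem.Dict.get?_empty x)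
      have hcont : ((PySem.List.enumerate a 0).foldl
          (fun d p => if d.contains p.2 then d else d.insert p.2 p.1)
          PySem.Dict.empty).contains x = true := by
        rw [PySem.Dict.contains_eq_isSome_get?, hj]; rfl
      rw [if_pos (by simp [hcont]), hj]
      simp only [Option.getD_some]
      refine iff_of_false ?_ ?_
      · intro h
        rcases h with h | h
        · exact h rfl
        · omega
      · intro h
        rcases h with h | h
        · exact hxt h
        · have : 1 ≤ a.count x := List.count_pos_iff.mpr hxa
          omega
    · have hnone : ((PySem.List.enumerate a 0).foldl
          (fun d p => if d.contains p.2 then d else d.insert p.2 p.1)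
          PySem.Dict.empty).get? x = none := by
        rw [pvFirstKeep x a 0 _ hxa]
        exact PySem.Dict.get?_empty x
      have hcont : ((PySem.List.enumerate a 0).foldl
          (fun d p => if d.contains p.2 then d else d.insert p.2 p.1)
          PySem.Dict.empty).contains x = false := by
        rw [PySem.Dict.contains_eq_isSome_get?, hnone]; rfl
      rw [if_neg (by simp [hcont]), PySem.Dict.get?_insert_self]
      refine iff_of_true (Or.inr rfl) (Or.inr ?_)
      have ha : a.count x = 0 := List.count_eq_zero.mpr hxa
      have ht : t.count x = 0 := List.count_eq_zero.mpr hxt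
      omega

-- the append-if fold over enumerate, under a positionally equivalent condition, is pvF
theorem pvFilterEnum (c : Int → Int) (P : Int → Int → Prop) [inst : ∀ i x, Decidable (P i x)]
    (ns : List Int) : ∀ (s : Int) (out0 : List Int),
    (∀ (k : Nat) (hk : k < ns.length),
      (P (s + (k : Int)) ns[k] ↔ (ns[k] ∈ ns.drop (k+1) ∨ c ns[k] ≤ 1))) →
    ((PySem.List.enumerate ns s).foldl
      (fun out p => if P p.1 p.2 then out ++ [p.2] else out) out0) = out0 ++ pvF c ns := by
  induction ns with
  | nil => intro s out0 _; simp [PySem.List.enumerate_nil, pvF]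
  | cons x t ih =>
    intro s out0 hP
    rw [PySem.List.enumerate_cons]
    simp only [List.foldl_cons]
    have h0 := hP 0 (by simp)
    simp only [List.getElem_cons_zero, List.drop_succ_cons, List.drop_zero] at h0
    push_cast at h0
    rw [ih (s+1) _ ?_]
    · simp only [pvF]
      by_cases hx : x ∈ t ∨ c x ≤ 1
      · rw [if_pos (by rw [add_zero] at h0; exact h0.mpr hx), if_pos hx]
        simp
      · rw [if_neg (by rw [add_zero] at h0; exact fun h => hx (h0.mp h)), if_neg hx]
        simp
    · intro k hk
      have h1 := hP (k+1) (by simpa using Nat.succ_lt_succ hk)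
      simp only [List.getElem_cons_succ, List.drop_succ_cons] at h1
      have harr : s + 1 + (k : Int) = s + ((k : Nat) + 1 : Nat) := by push_cast; ring
      rw [harr]
      exact h1

theorem solve_alt_eq_pvF (nums : List Int) :
    solve_alt nums = pvF (fun x => (nums.count x : Int)) nums := by
  dsimp only [solve_alt]
  rw [PySem.List.foldl_prod_mk
    (f := fun (d : PySem.Dict Int Int) (p : Int × Int) =>
      if d.contains p.2 then d else d.insert p.2 p.1)
    (g := fun (d : PySem.Dict Int Int) (p : Int × Int) => d.insert p.2 p.1)]
  dsimp only
  rw [pvFilterEnum (fun x => (nums.count x : Int))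
      (fun i x => i ≠ (List.foldl (fun d p => d.insert p.2 p.1) PySem.Dict.empty
          (PySem.List.enumerate nums)).getD x 0
        ∨ (List.foldl (fun d p => if d.contains p.2 then d else d.insert p.2 p.1)
            PySem.Dict.empty (PySem.List.enumerate nums)).getD x 0
          = (List.foldl (fun d p => d.insert p.2 p.1) PySem.Dict.empty
            (PySem.List.enumerate nums)).getD x 0)
      nums 0 [] ?_, List.nil_append]
  intro k hk
  have hdrop : nums.drop k = nums[k] :: nums.drop (k+1) := List.drop_eq_getElem_cons hk
  have hdec : nums = nums.take k ++ nums[k] :: nums.drop (k+1) := by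
    conv_lhs => rw [← List.take_append_drop k nums, hdrop]
  have h := pvCond (nums.take k) (nums.drop (k+1)) nums[k]
  rw [← hdec] at h
  have hlen : ((nums.take k).length : Int) = (k : Int) := by
    rw [List.length_take_of_le hk.le]
  rw [hlen] at h
  simpa using h

-- ===== VERDICT (by name: the statement is the Claim_ definition above) =====
theorem solve_spec : Claim_equal_solve := by
  intro nums _
  unfold Spec_solve
  rw [solve_eq_pvF, solve_alt_eq_pvF]
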